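-- pv_equiv track=rewrite | github.com/chesspiece/bioinformatics_active_learning_approach | six_v1/comb_alg.py | ordered_edges_to_cycle
-- ===== SOURCE A (Python) =====
-- def ordered_edges_to_cycle(edges: list[tuple[int, int]]) -> list[list[int]]:
--     cycles = []
--     curr_cycle = []
--     for i, j in edges:
--         if j < i:
--             cycles.append([j] + curr_cycle + [i])
--             curr_cycle = []
--         else:
--             curr_cycle += [i, j]
--     return cycles
-- ===== SOURCE B (Python) =====
-- def ordered_edges_to_cycle(edges: list[tuple[int, int]]) -> list[list[int]]:
--     cycles = []
--     start = 0
--     for k, (i, j) in enumerate(edges):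
--         if j < i:
--             flat = [v for e in edges[start:k] for v in e]
--             cycles.append([j] + flat + [i])
--             start = k + 1
--     return cycles
-- ===== Notes on version B (the rewrite author's own statement) =====
-- stated objective: alternative
-- what changed: B drops A's growing curr_cycle accumulator (and its else branch) entirely: it keeps only a segment-boundary index and, at each closing edge (j < i), rebuilds the cycle by flattening the slice edges[start:k] with a comprehension.
import Mathlib
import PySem

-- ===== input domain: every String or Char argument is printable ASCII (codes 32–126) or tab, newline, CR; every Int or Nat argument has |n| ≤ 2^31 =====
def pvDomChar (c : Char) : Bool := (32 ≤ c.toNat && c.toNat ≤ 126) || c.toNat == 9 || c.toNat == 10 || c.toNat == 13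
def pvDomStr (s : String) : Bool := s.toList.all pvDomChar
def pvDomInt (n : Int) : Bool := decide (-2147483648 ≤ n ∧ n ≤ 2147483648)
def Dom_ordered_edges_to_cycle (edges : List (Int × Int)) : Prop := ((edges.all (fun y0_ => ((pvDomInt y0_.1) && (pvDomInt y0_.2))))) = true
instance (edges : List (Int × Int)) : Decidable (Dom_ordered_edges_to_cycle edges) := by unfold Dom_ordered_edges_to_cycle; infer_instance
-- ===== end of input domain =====

-- B replaces A's growing curr_cycle accumulator by a segment-boundary index and rebuilds
-- each cycle from a slice of the input (objective: alternative decomposition, same cost).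

-- ===== PORT A =====
-- loop state: (cycles, curr_cycle)
def pvStepA (st : List (List Int) × List Int) (ij : Int × Int) : List (List Int) × List Int :=
  if ij.2 < ij.1 then (st.1 ++ [[ij.2] ++ st.2 ++ [ij.1]], [])
  else (st.1, st.2 ++ [ij.1, ij.2])

def ordered_edges_to_cycle (edges : List (Int × Int)) : List (List Int) :=
  (edges.foldl pvStepA ([], [])).1

-- ===== PORT B =====
-- loop state: (cycles, start); the comprehension [v for e in edges[start:k] for v in e] is flatMap
def pvStepB (edges : List (Int × Int)) (st : List (List Int) × Int) (ke : Int × (Int × Int)) :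
    List (List Int) × Int :=
  if ke.2.2 < ke.2.1 then
    (st.1 ++ [[ke.2.2] ++ (PySem.List.slice edges (some st.2) (some ke.1)).flatMap
        (fun e => [e.1, e.2]) ++ [ke.2.1]], ke.1 + 1)
  else st

def ordered_edges_to_cycle_alt (edges : List (Int × Int)) : List (List Int) :=
  ((PySem.List.enumerate edges 0).foldl (pvStepB edges) ([], 0)).1

-- ===== PRECONDITION & SPEC =====
def Spec_ordered_edges_to_cycle (edges : List (Int × Int)) (out : List (List Int)) : Prop := out = ordered_edges_to_cycle_alt edges
instance (edges : List (Int × Int)) (out : List (List Int)) : Decidable (Spec_ordered_edges_to_cycle edges out) := by unfold Spec_ordered_edges_to_cycle; infer_instance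

-- ===== CLAIM (what is proved, stated in full; the proofs are below) =====
def Claim_equal_ordered_edges_to_cycle : Prop := ∀ (edges : List (Int × Int)), Dom_ordered_edges_to_cycle edges → Spec_ordered_edges_to_cycle edges (ordered_edges_to_cycle edges)

-- ===== LEMMAS AND PROOFS =====

-- invariant: at index k with boundary start ≤ k, A's curr_cycle is exactly the flattening of edges[start:k]
lemma pv_loop (edges : List (Int × Int)) :
    ∀ (suf : List (Int × Int)) (k start : Nat) (cycles : List (List Int)),
      start ≤ k → edges.drop k = suf →
      ((PySem.List.enumerate suf (k : Int)).foldl (pvStepB edges) (cycles, (start : Int))).1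
        = (suf.foldl pvStepA
            (cycles, ((edges.drop start).take (k - start)).flatMap (fun e => [e.1, e.2]))).1 := by
  intro suf
  induction suf with
  | nil => intro k start cycles _ _; simp [PySem.List.enumerate]
  | cons e suf' ih =>
    intro k start cycles hle hdrop
    have hget : edges[k]? = some e := by
      have : (edges.drop k)[0]? = some e := by rw [hdrop]; rfl
      simpa using this
    have hdrop' : edges.drop (k + 1) = suf' := by
      have : (edges.drop k).drop 1 = suf' := by rw [hdrop]; rfl
      simpa [List.drop_drop] using this
    rw [PySem.List.enumerate_cons]
    simp only [List.foldl_cons, pvStepB, pvStepA]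
    have hcast : ((k : Int) + 1) = ((k + 1 : Nat) : Int) := by push_cast; ring
    by_cases hc : e.2 < e.1
    · simp only [hc, if_pos]
      rw [PySem.List.slice_natCast, hcast,
        ih (k + 1) (k + 1) _ (le_refl _) hdrop']
      simp
    · simp only [hc, if_neg, not_false_iff]
      rw [hcast, ih (k + 1) start _ (by omega) hdrop']
      have hk1 : k + 1 - start = (k - start) + 1 := by omega
      have hidx : (edges.drop start)[k - start]? = some e := by
        rw [List.getElem?_drop]
        have : start + (k - start) = k := by omega
        rw [this]; exact hget
      rw [hk1, List.take_succ, hidx]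
      simp

theorem pv_main (edges : List (Int × Int)) :
    ordered_edges_to_cycle edges = ordered_edges_to_cycle_alt edges := by
  unfold ordered_edges_to_cycle ordered_edges_to_cycle_alt
  have := pv_loop edges edges 0 0 [] (le_refl 0) rfl
  simpa using this.symm

-- ===== VERDICT (by name: the statement is the Claim_ definition above) =====
theorem ordered_edges_to_cycle_spec : Claim_equal_ordered_edges_to_cycle := by
  intro edges _
  unfold Spec_ordered_edges_to_cycle
  exact pv_main edges
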